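-- pv_equiv track=rewrite | github.com/amcc1996/advent-of-code-2024 | day21/main_old_v2.py | convert_relative_pos_to_directions
-- ===== SOURCE A (Python) =====
-- def convert_relative_pos_to_directions(i_start, j_start, i_end, j_end, keypad):
--     horizontal_dir_string = ''
--     if j_end > j_start:
--         horizontal_dir_string += abs(j_end - j_start) * '>'
--     elif j_end < j_start:
--         horizontal_dir_string += abs(j_end - j_start) * '<'
--
--     vertical_dir_string = ''
--     if i_end > i_start:
--         vertical_dir_string += abs(i_end - i_start) * 'v'
--     elif i_end < i_start:
--         vertical_dir_string += abs(i_end - i_start) * '^'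
--
--     if i_end == i_start:
--         return [horizontal_dir_string]
--
--     elif j_end == j_start:
--         return [vertical_dir_string]
--
--     else:
--         dir_string_list = []
--         path = []
--         j_sign = 1 if j_end > j_start else -1
--         for j in range(abs(j_end - j_start) + 1):
--             path.append((i_start, j_start + j * j_sign))
--
--         i_sign = 1 if i_end > i_start else -1
--         for i in range(abs(i_end - i_start) + 1):
--             path.append((i_start + i * i_sign, j_end))
--
--         if not any([keypad[i][j] is None for i, j in path]):
--             dir_string_list.append(horizontal_dir_string + vertical_dir_string)
--
--         path = []
--         i_sign = 1 if i_end > i_start else -1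
--         for i in range(abs(i_end - i_start) + 1):
--             path.append((i_start + i * i_sign, j_start))
--
--         j_sign = 1 if j_end > j_start else -1
--         for j in range(abs(j_end - j_start) + 1):
--             path.append((i_end, j_start + j * j_sign))
--
--         if not any([keypad[i][j] is None for i, j in path]):
--             dir_string_list.append(vertical_dir_string + horizontal_dir_string)
--
--         return dir_string_list
-- ===== SOURCE B (Python) =====
-- def convert_relative_pos_to_directions(i_start, j_start, i_end, j_end, keypad):
--     dj = j_end - j_start
--     di = i_end - i_start
--     horizontal_dir_string = ('>' if dj > 0 else '<') * abs(dj)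
--     vertical_dir_string = ('v' if di > 0 else '^') * abs(di)
--     if di == 0:
--         return [horizontal_dir_string]
--     if dj == 0:
--         return [vertical_dir_string]
--
--     def walk_is_clear(dir_string):
--         # walk the direction string from the start cell; every visited cell
--         # (including the start) must hold a key, i.e. not be None
--         i, j = i_start, j_start
--         if keypad[i][j] is None:
--             return False
--         for c in dir_string:
--             i += (c == 'v') - (c == '^')
--             j += (c == '>') - (c == '<')
--             if keypad[i][j] is None:
--                 return False
--         return True
--
--     result = []
--     if walk_is_clear(horizontal_dir_string + vertical_dir_string):
--         result.append(horizontal_dir_string + vertical_dir_string)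
--     if walk_is_clear(vertical_dir_string + horizontal_dir_string):
--         result.append(vertical_dir_string + horizontal_dir_string)
--     return result
-- ===== Notes on version B (the rewrite author's own statement) =====
-- stated objective: simpler
-- what changed: Instead of building two explicit coordinate-path lists with four range loops and scanning each with any(), B derives the visited cells by walking the already-computed direction strings with a single per-character walker that checks each cell as it goes.
import Mathlib
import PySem

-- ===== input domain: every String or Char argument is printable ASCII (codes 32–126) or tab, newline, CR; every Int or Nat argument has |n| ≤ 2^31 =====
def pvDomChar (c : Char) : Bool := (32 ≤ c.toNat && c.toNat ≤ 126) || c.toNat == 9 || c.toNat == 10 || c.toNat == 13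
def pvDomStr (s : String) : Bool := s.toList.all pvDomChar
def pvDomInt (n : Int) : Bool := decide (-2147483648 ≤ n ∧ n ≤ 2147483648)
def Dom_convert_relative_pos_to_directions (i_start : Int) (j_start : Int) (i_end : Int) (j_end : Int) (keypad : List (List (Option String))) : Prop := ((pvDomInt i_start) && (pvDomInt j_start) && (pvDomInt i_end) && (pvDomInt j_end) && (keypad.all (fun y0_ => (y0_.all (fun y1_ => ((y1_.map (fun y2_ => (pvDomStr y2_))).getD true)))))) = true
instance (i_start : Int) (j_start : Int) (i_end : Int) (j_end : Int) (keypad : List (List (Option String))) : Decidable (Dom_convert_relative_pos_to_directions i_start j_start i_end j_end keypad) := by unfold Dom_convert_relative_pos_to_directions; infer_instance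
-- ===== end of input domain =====

-- B replaces A's four coordinate-list building loops and any-None scans by a single walker over the
-- direction strings themselves (objective: simpler decomposition; same asymptotic cost).

-- ===== PORT A =====
-- keypad[i][j] with Python indexing; `true` (treated as a gap) where Python would raise IndexError
-- (those inputs are excluded by Pre_ below).
def pvA_cellIsNone (keypad : List (List (Option String))) (c : Int × Int) : Bool :=
  match PySem.List.pyGet? keypad c.1 with
  | some row =>
      match PySem.List.pyGet? row c.2 with
      | some v => v.isNone
      | none => true
  | none => true

def convert_relative_pos_to_directions (i_start : Int) (j_start : Int) (i_end : Int) (j_end : Int) (keypad : List (List (Option String))) : List String :=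
  let horizontal_dir_string : String :=
    if j_end > j_start then String.mk (List.replicate (j_end - j_start).natAbs '>')
    else if j_end < j_start then String.mk (List.replicate (j_end - j_start).natAbs '<')
    else ""
  let vertical_dir_string : String :=
    if i_end > i_start then String.mk (List.replicate (i_end - i_start).natAbs 'v')
    else if i_end < i_start then String.mk (List.replicate (i_end - i_start).natAbs '^')
    else ""
  if i_end = i_start then [horizontal_dir_string]
  else if j_end = j_start then [vertical_dir_string]
  else
    let j_sign : Int := if j_end > j_start then 1 else -1
    let i_sign : Int := if i_end > i_start then 1 else -1
    let path1 : List (Int × Int) :=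
      (PySem.List.pyRange 0 (((j_end - j_start).natAbs : Int) + 1) 1).map
        (fun j => (i_start, j_start + j * j_sign))
      ++ (PySem.List.pyRange 0 (((i_end - i_start).natAbs : Int) + 1) 1).map
        (fun i => (i_start + i * i_sign, j_end))
    let l1 : List String :=
      if !(path1.any (pvA_cellIsNone keypad)) then [horizontal_dir_string ++ vertical_dir_string] else []
    let path2 : List (Int × Int) :=
      (PySem.List.pyRange 0 (((i_end - i_start).natAbs : Int) + 1) 1).map
        (fun i => (i_start + i * i_sign, j_start))
      ++ (PySem.List.pyRange 0 (((j_end - j_start).natAbs : Int) + 1) 1).map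
        (fun j => (i_end, j_start + j * j_sign))
    let l2 : List String :=
      if !(path2.any (pvA_cellIsNone keypad)) then [vertical_dir_string ++ horizontal_dir_string] else []
    l1 ++ l2

-- ===== PORT B =====
def pvB_di (c : Char) : Int := if c = 'v' then 1 else if c = '^' then -1 else 0
def pvB_dj (c : Char) : Int := if c = '>' then 1 else if c = '<' then -1 else 0

-- keypad[i][j] holds a key; `false` both on a gap (None) and where Python would raise IndexError
-- (the walker stops either way; the raising inputs are excluded by Pre_).
def pvB_clear (keypad : List (List (Option String))) (i j : Int) : Bool :=
  match PySem.List.pyGet? keypad i with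
  | some row =>
      match PySem.List.pyGet? row j with
      | some (some _) => true
      | _ => false
  | none => false

def pvB_walk (keypad : List (List (Option String))) (i j : Int) : List Char → Bool
  | [] => pvB_clear keypad i j
  | c :: rest => pvB_clear keypad i j && pvB_walk keypad (i + pvB_di c) (j + pvB_dj c) rest

def convert_relative_pos_to_directions_alt (i_start : Int) (j_start : Int) (i_end : Int) (j_end : Int) (keypad : List (List (Option String))) : List String :=
  let dj : Int := j_end - j_start
  let di : Int := i_end - i_start
  let horizontal_dir_string : String := String.mk (List.replicate dj.natAbs (if dj > 0 then '>' else '<'))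
  let vertical_dir_string : String := String.mk (List.replicate di.natAbs (if di > 0 then 'v' else '^'))
  if di = 0 then [horizontal_dir_string]
  else if dj = 0 then [vertical_dir_string]
  else
    (if pvB_walk keypad i_start j_start (horizontal_dir_string.toList ++ vertical_dir_string.toList)
     then [horizontal_dir_string ++ vertical_dir_string] else [])
    ++ (if pvB_walk keypad i_start j_start (vertical_dir_string.toList ++ horizontal_dir_string.toList)
        then [vertical_dir_string ++ horizontal_dir_string] else [])

-- ===== PRECONDITION & SPEC =====
def pvIdxOK (keypad : List (List (Option String))) (i j : Int) : Bool :=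
  match PySem.List.pyGet? keypad i with
  | some row => (PySem.List.pyGet? row j).isSome
  | none => false

-- Pre_ excludes exactly the inputs on which Python A raises IndexError: in the L-shaped case every
-- cell on the border of the rectangle spanned by start and end (the four corners, the two columns
-- j_start/j_end and the two rows i_start/i_end) must be a valid (possibly negative) index.
def Pre_convert_relative_pos_to_directions (i_start : Int) (j_start : Int) (i_end : Int) (j_end : Int) (keypad : List (List (Option String))) : Prop :=
  i_end = i_start ∨ j_end = j_start ∨
    ((pvIdxOK keypad i_start j_start = true ∧ pvIdxOK keypad i_start j_end = true ∧
      pvIdxOK keypad i_end j_start = true ∧ pvIdxOK keypad i_end j_end = true) ∧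
     (∀ i ∈ PySem.List.pyRange (if i_start ≤ i_end then i_start else i_end) ((if i_start ≤ i_end then i_end else i_start) + 1) 1,
        pvIdxOK keypad i j_start = true ∧ pvIdxOK keypad i j_end = true) ∧
     (∀ j ∈ PySem.List.pyRange (if j_start ≤ j_end then j_start else j_end) ((if j_start ≤ j_end then j_end else j_start) + 1) 1,
        pvIdxOK keypad i_start j = true ∧ pvIdxOK keypad i_end j = true))

instance (i_start : Int) (j_start : Int) (i_end : Int) (j_end : Int) (keypad : List (List (Option String))) : Decidable (Pre_convert_relative_pos_to_directions i_start j_start i_end j_end keypad) := by unfold Pre_convert_relative_pos_to_directions; infer_instance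

def pvWitness_convert_relative_pos_to_directions : Int × Int × Int × Int × List (List (Option String)) :=
  (0, 0, 1, 1, [[some "7", some "8"], [some "4", some "5"]])

def Spec_convert_relative_pos_to_directions (i_start : Int) (j_start : Int) (i_end : Int) (j_end : Int) (keypad : List (List (Option String))) (out : List String) : Prop := out = convert_relative_pos_to_directions_alt i_start j_start i_end j_end keypad
instance (i_start : Int) (j_start : Int) (i_end : Int) (j_end : Int) (keypad : List (List (Option String))) (out : List String) : Decidable (Spec_convert_relative_pos_to_directions i_start j_start i_end j_end keypad out) := by unfold Spec_convert_relative_pos_to_directions; infer_instance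

-- ===== CLAIM (what is proved, stated in full; the proofs are below) =====
def Claim_equal_convert_relative_pos_to_directions : Prop := ∀ (i_start : Int) (j_start : Int) (i_end : Int) (j_end : Int) (keypad : List (List (Option String))), Dom_convert_relative_pos_to_directions i_start j_start i_end j_end keypad → Pre_convert_relative_pos_to_directions i_start j_start i_end j_end keypad → Spec_convert_relative_pos_to_directions i_start j_start i_end j_end keypad (convert_relative_pos_to_directions i_start j_start i_end j_end keypad)

-- ===== LEMMAS AND PROOFS =====

@[simp] theorem pvB_di_gt : pvB_di '>' = 0 := by decide
@[simp] theorem pvB_di_lt : pvB_di '<' = 0 := by decide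
@[simp] theorem pvB_di_dn : pvB_di 'v' = 1 := by decide
@[simp] theorem pvB_di_up : pvB_di '^' = -1 := by decide
@[simp] theorem pvB_dj_gt : pvB_dj '>' = 1 := by decide
@[simp] theorem pvB_dj_lt : pvB_dj '<' = -1 := by decide
@[simp] theorem pvB_dj_dn : pvB_dj 'v' = 0 := by decide
@[simp] theorem pvB_dj_up : pvB_dj '^' = 0 := by decide

theorem pvClear_eq (keypad : List (List (Option String))) (c : Int × Int) :
    pvB_clear keypad c.1 c.2 = !pvA_cellIsNone keypad c := by
  unfold pvB_clear pvA_cellIsNone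
  rcases h1 : PySem.List.pyGet? keypad c.1 with _ | row
  · simp
  · rcases h2 : PySem.List.pyGet? row c.2 with _ | v
    · simp [h2]
    · cases v <;> simp [h2]

-- the cells B's walker visits, in order, start included
def pvVisited (i j : Int) : List Char → List (Int × Int)
  | [] => [(i, j)]
  | c :: rest => (i, j) :: pvVisited (i + pvB_di c) (j + pvB_dj c) rest

theorem pvWalk_eq_all (keypad : List (List (Option String))) (cs : List Char) :
    ∀ i j, pvB_walk keypad i j cs = (pvVisited i j cs).all (fun c => pvB_clear keypad c.1 c.2) := by
  induction cs with
  | nil => intro i j; simp [pvB_walk, pvVisited]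
  | cons c rest ih => intro i j; simp [pvB_walk, pvVisited, ih]

theorem pvVisited_replicate_append (c : Char) (rest : List Char) :
    ∀ (n : Nat) (i j : Int),
      pvVisited i j (List.replicate n c ++ rest)
      = (List.range n).map (fun k : Nat => (i + (k : Int) * pvB_di c, j + (k : Int) * pvB_dj c))
        ++ pvVisited (i + n * pvB_di c) (j + n * pvB_dj c) rest := by
  intro n
  induction n with
  | zero => intro i j; simp
  | succ n ih =>
      intro i j
      rw [List.replicate_succ, List.cons_append]
      show (i, j) :: pvVisited (i + pvB_di c) (j + pvB_dj c) (List.replicate n c ++ rest) = _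
      rw [ih]
      rw [List.range_succ_eq_map]
      simp only [List.map_cons, List.map_map]
      congr 1
      · simp
      congr 1
      · refine List.map_congr_left (fun k _ => ?_)
        have e1 : i + pvB_di c + (k : Int) * pvB_di c = i + ((k : Nat).succ : Int) * pvB_di c := by
          push_cast; ring
        have e2 : j + pvB_dj c + (k : Int) * pvB_dj c = j + ((k : Nat).succ : Int) * pvB_dj c := by
          push_cast; ring
        simp [e1, e2]
      · have e1 : i + pvB_di c + (n : Int) * pvB_di c = i + ((n + 1 : Nat) : Int) * pvB_di c := by
          push_cast; ring
        have e2 : j + pvB_dj c + (n : Int) * pvB_dj c = j + ((n + 1 : Nat) : Int) * pvB_dj c := by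
          push_cast; ring
        rw [e1, e2]

theorem pvVisited_replicate (c : Char) (n : Nat) (i j : Int) :
    pvVisited i j (List.replicate n c)
      = (List.range (n + 1)).map (fun k : Nat => (i + (k : Int) * pvB_di c, j + (k : Int) * pvB_dj c)) := by
  have := pvVisited_replicate_append c [] n i j
  rw [List.append_nil] at this
  rw [this, List.range_succ, List.map_append]
  simp [pvVisited]

theorem pvWalkTwoLegs (keypad : List (List (Option String))) (i j : Int) (c1 c2 : Char) (n m : Nat) :
    pvB_walk keypad i j (List.replicate n c1 ++ List.replicate m c2)
    = (((List.range n).map (fun k : Nat => (i + (k : Int) * pvB_di c1, j + (k : Int) * pvB_dj c1)))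
       ++ (List.range (m + 1)).map
            (fun k : Nat => (i + (n : Int) * pvB_di c1 + (k : Int) * pvB_di c2, j + (n : Int) * pvB_dj c1 + (k : Int) * pvB_dj c2))).all
        (fun c => pvB_clear keypad c.1 c.2) := by
  rw [pvWalk_eq_all, pvVisited_replicate_append, pvVisited_replicate]

theorem pvPathAll (keypad : List (List (Option String))) (path : List (Int × Int)) :
    (!(path.any (pvA_cellIsNone keypad))) = path.all (fun c => pvB_clear keypad c.1 c.2) := by
  induction path with
  | nil => rfl
  | cons c rest ih => simp [List.any_cons, List.all_cons, ih, pvClear_eq, Bool.not_or]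

theorem pvDupAll {α : Type} (Q : α → Bool) (f g : Nat → α) (n m : Nat) (h : f n = g 0) :
    (((List.range (n + 1)).map f).all Q && ((List.range (m + 1)).map g).all Q)
    = (((List.range n).map f).all Q && ((List.range (m + 1)).map g).all Q) := by
  rw [List.range_succ, List.map_append, List.all_append]
  rw [List.range_succ_eq_map (n := m), List.map_cons, List.all_cons, h]
  cases hq : Q (g 0) <;> simp [hq]


theorem pvToList_mk (l : List Char) : (String.mk l).toList = l :=
  Eq.symm (String.ofList_eq.mp rfl)

theorem pvRangeMap {α : Type} (f : Int → α) (n : Nat) :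
    (PySem.List.pyRange 0 ((n : Int) + 1) 1).map f
      = (List.range (n + 1)).map (fun k : Nat => f (k : Int)) := by
  rw [PySem.List.pyRange_one, List.map_map]
  have h : (((n : Int) + 1) - 0).toNat = n + 1 := by omega
  rw [h]
  exact List.map_congr_left (fun k _ => by simp)

theorem pvLegGen (keypad : List (List (Option String))) (i0 j0 : Int) (c1 c2 : Char) (n m : Nat)
    (f g : Nat → Int × Int)
    (hf : ∀ k : Nat, f k = (i0 + (k : Int) * pvB_di c1, j0 + (k : Int) * pvB_dj c1))
    (hg : ∀ k : Nat, g k = (i0 + (n : Int) * pvB_di c1 + (k : Int) * pvB_di c2,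
                            j0 + (n : Int) * pvB_dj c1 + (k : Int) * pvB_dj c2)) :
    pvB_walk keypad i0 j0 (List.replicate n c1 ++ List.replicate m c2)
      = !(((List.range (n + 1)).map f ++ (List.range (m + 1)).map g).any (pvA_cellIsNone keypad)) := by
  rw [pvPathAll, pvWalkTwoLegs]
  rw [List.map_congr_left (fun k (_ : k ∈ List.range (n + 1)) => hf k),
      List.map_congr_left (fun k (_ : k ∈ List.range (m + 1)) => hg k)]
  rw [List.all_append, List.all_append]
  exact (pvDupAll _ _ _ n m (by simp)).symm

theorem pvCond1 (keypad : List (List (Option String))) (i_start j_start _i_end j_end si sj : Int)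
    (c1 c2 : Char) (n m : Nat)
    (hdi1 : pvB_di c1 = 0) (hdj1 : pvB_dj c1 = sj) (hdi2 : pvB_di c2 = si) (hdj2 : pvB_dj c2 = 0)
    (hn : j_start + (n : Int) * sj = j_end) :
    pvB_walk keypad i_start j_start (List.replicate n c1 ++ List.replicate m c2)
      = !(((PySem.List.pyRange 0 ((n : Int) + 1) 1).map (fun j => (i_start, j_start + j * sj))
           ++ (PySem.List.pyRange 0 ((m : Int) + 1) 1).map (fun i => (i_start + i * si, j_end))).any
            (pvA_cellIsNone keypad)) := by
  rw [pvRangeMap, pvRangeMap]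
  exact pvLegGen keypad i_start j_start c1 c2 n m _ _
    (fun k => by simp [hdi1, hdj1])
    (fun k => by simp [hdi1, hdj1, hdi2, hdj2, hn])

theorem pvCond2 (keypad : List (List (Option String))) (i_start j_start i_end _j_end si sj : Int)
    (c1 c2 : Char) (n m : Nat)
    (hdi1 : pvB_di c1 = 0) (hdj1 : pvB_dj c1 = sj) (hdi2 : pvB_di c2 = si) (hdj2 : pvB_dj c2 = 0)
    (hm : i_start + (m : Int) * si = i_end) :
    pvB_walk keypad i_start j_start (List.replicate m c2 ++ List.replicate n c1)
      = !(((PySem.List.pyRange 0 ((m : Int) + 1) 1).map (fun i => (i_start + i * si, j_start))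
           ++ (PySem.List.pyRange 0 ((n : Int) + 1) 1).map (fun j => (i_end, j_start + j * sj))).any
            (pvA_cellIsNone keypad)) := by
  rw [pvRangeMap, pvRangeMap]
  exact pvLegGen keypad i_start j_start c2 c1 m n _ _
    (fun k => by simp [hdi2, hdj2])
    (fun k => by simp [hdi1, hdj1, hdi2, hdj2, hm])

-- ===== VERDICT (by name: the statement is the Claim_ definition above) =====
theorem convert_relative_pos_to_directions_spec : Claim_equal_convert_relative_pos_to_directions := by
  intro i_start j_start i_end j_end keypad _ _
  unfold Spec_convert_relative_pos_to_directions
  unfold convert_relative_pos_to_directions convert_relative_pos_to_directions_alt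
  by_cases hi : i_end = i_start
  · rcases lt_trichotomy j_start j_end with h | h | h
    · simp only [if_pos hi, if_pos (by omega : i_end - i_start = 0),
        if_pos (by omega : j_end > j_start), if_pos (by omega : j_end - j_start > 0)]
    · simp only [if_pos hi, if_pos (by omega : i_end - i_start = 0),
        if_neg (by omega : ¬ j_end > j_start), if_neg (by omega : ¬ j_end < j_start),
        show (j_end - j_start).natAbs = 0 from by omega, List.replicate_zero]
      rfl
    · simp only [if_pos hi, if_pos (by omega : i_end - i_start = 0),
        if_neg (by omega : ¬ j_end > j_start), if_pos (by omega : j_end < j_start),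
        if_neg (by omega : ¬ j_end - j_start > 0)]
  · by_cases hj : j_end = j_start
    · rcases lt_trichotomy i_start i_end with h | h | h
      · simp only [if_neg hi, if_neg (by omega : ¬ i_end - i_start = 0), if_pos hj,
          if_pos (by omega : j_end - j_start = 0),
          if_pos (by omega : i_end > i_start), if_pos (by omega : i_end - i_start > 0)]
      · exact absurd h.symm hi
      · simp only [if_neg hi, if_neg (by omega : ¬ i_end - i_start = 0), if_pos hj,
          if_pos (by omega : j_end - j_start = 0),
          if_neg (by omega : ¬ i_end > i_start), if_pos (by omega : i_end < i_start),
          if_neg (by omega : ¬ i_end - i_start > 0)]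
    · rcases lt_or_gt_of_ne (fun h => hj h.symm) with hjc | hjc <;>
        rcases lt_or_gt_of_ne (fun h => hi h.symm) with hic | hic
      · -- j_start < j_end, i_start < i_end : chars '>' 'v'
        simp only [if_neg hi, if_neg (by omega : ¬ i_end - i_start = 0), if_neg hj,
          if_neg (by omega : ¬ j_end - j_start = 0),
          if_pos (by omega : j_end > j_start), if_pos (by omega : i_end > i_start),
          if_pos (by omega : j_end - j_start > 0), if_pos (by omega : i_end - i_start > 0)]
        rw [pvToList_mk, pvToList_mk]
        rw [pvCond1 keypad i_start j_start i_end j_end 1 1 '>' 'v' _ _ (by simp) (by simp)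
              (by simp) (by simp) (by omega),
            pvCond2 keypad i_start j_start i_end j_end 1 1 '>' 'v' _ _ (by simp) (by simp)
              (by simp) (by simp) (by omega)]
      · -- j_start < j_end, i_end < i_start : chars '>' '^'
        simp only [if_neg hi, if_neg (by omega : ¬ i_end - i_start = 0), if_neg hj,
          if_neg (by omega : ¬ j_end - j_start = 0),
          if_pos (by omega : j_end > j_start), if_neg (by omega : ¬ i_end > i_start),
          if_pos (by omega : i_end < i_start),
          if_pos (by omega : j_end - j_start > 0), if_neg (by omega : ¬ i_end - i_start > 0)]
        rw [pvToList_mk, pvToList_mk]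
        rw [pvCond1 keypad i_start j_start i_end j_end (-1) 1 '>' '^' _ _ (by simp) (by simp)
              (by simp) (by simp) (by omega),
            pvCond2 keypad i_start j_start i_end j_end (-1) 1 '>' '^' _ _ (by simp) (by simp)
              (by simp) (by simp) (by omega)]
      · -- j_end < j_start, i_start < i_end : chars '<' 'v'
        simp only [if_neg hi, if_neg (by omega : ¬ i_end - i_start = 0), if_neg hj,
          if_neg (by omega : ¬ j_end - j_start = 0),
          if_neg (by omega : ¬ j_end > j_start), if_pos (by omega : j_end < j_start),
          if_pos (by omega : i_end > i_start),
          if_neg (by omega : ¬ j_end - j_start > 0), if_pos (by omega : i_end - i_start > 0)]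
        rw [pvToList_mk, pvToList_mk]
        rw [pvCond1 keypad i_start j_start i_end j_end 1 (-1) '<' 'v' _ _ (by simp) (by simp)
              (by simp) (by simp) (by omega),
            pvCond2 keypad i_start j_start i_end j_end 1 (-1) '<' 'v' _ _ (by simp) (by simp)
              (by simp) (by simp) (by omega)]
      · -- j_end < j_start, i_end < i_start : chars '<' '^'
        simp only [if_neg hi, if_neg (by omega : ¬ i_end - i_start = 0), if_neg hj,
          if_neg (by omega : ¬ j_end - j_start = 0),
          if_neg (by omega : ¬ j_end > j_start), if_pos (by omega : j_end < j_start),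
          if_neg (by omega : ¬ i_end > i_start), if_pos (by omega : i_end < i_start),
          if_neg (by omega : ¬ j_end - j_start > 0), if_neg (by omega : ¬ i_end - i_start > 0)]
        rw [pvToList_mk, pvToList_mk]
        rw [pvCond1 keypad i_start j_start i_end j_end (-1) (-1) '<' '^' _ _ (by simp) (by simp)
              (by simp) (by simp) (by omega),
            pvCond2 keypad i_start j_start i_end j_end (-1) (-1) '<' '^' _ _ (by simp) (by simp)
              (by simp) (by simp) (by omega)]
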